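-- pv_equiv track=rewrite | github.com/journich/Altair-C-Basic | compatibility_tests/ahl_games/scripts/generate_golden_simple.py | strip_banner
-- ===== SOURCE A (Python) =====
-- def strip_banner(output):
--     """Remove interpreter banner."""
--     lines = output.split('\n')
--     result = []
--     skip = True
--
--     for line in lines:
--         if skip:
--             if 'MICROSOFT BASIC' in line or 'ALTAIR' in line or 'COPYRIGHT' in line:
--                 continue
--             if 'BYTES FREE' in line or line.strip() == 'OK' or '[8K VERSION]' in line or '[4K VERSION]' in line:
--                 continue
--             if line.strip() == '':
--                 continue
--             skip = False
--
--         if not skip: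
--             result.append(line.rstrip())
--
--     # Remove trailing empty lines
--     while result and not result[-1]:
--         result.pop()
--
--     return '\n'.join(result)
-- ===== SOURCE B (Python) =====
-- def _is_banner(line):
--     s = line.strip()
--     return ('MICROSOFT BASIC' in line or 'ALTAIR' in line or 'COPYRIGHT' in line
--             or 'BYTES FREE' in line or s == 'OK'
--             or '[8K VERSION]' in line or '[4K VERSION]' in line or s == '')
--
--
-- def strip_banner(output):
--     """Remove interpreter banner."""
--     # Phase 1 (backward pass over the raw lines): drop trailing all-whitespace
--     # lines of the WHOLE transcript before any banner logic runs.
--     trimmed = []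
--     for line in reversed(output.split('\n')):
--         if trimmed or line.strip() != '':
--             trimmed.append(line)
--     trimmed.reverse()
--     # Phase 2: locate the first non-banner line; everything from there on is
--     # content (trailing blanks are already gone, so no post-trim is needed).
--     start = next((k for k, l in enumerate(trimmed) if not _is_banner(l)),
--                  len(trimmed))
--     return '\n'.join(l.rstrip() for l in trimmed[start:])
-- ===== Notes on version B (the rewrite author's own statement) =====
-- stated objective: alternative
-- what changed: B reverses the phase order: a backward pass first trims trailing all-whitespace lines of the whole transcript (before any banner logic), then a single forward search finds the first non-banner line and the tail is joined rstripped, with no post-trim pop loop; correctness rests on the trim and drop phases commuting because every all-whitespace line is itself a banner line.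
import Mathlib
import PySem

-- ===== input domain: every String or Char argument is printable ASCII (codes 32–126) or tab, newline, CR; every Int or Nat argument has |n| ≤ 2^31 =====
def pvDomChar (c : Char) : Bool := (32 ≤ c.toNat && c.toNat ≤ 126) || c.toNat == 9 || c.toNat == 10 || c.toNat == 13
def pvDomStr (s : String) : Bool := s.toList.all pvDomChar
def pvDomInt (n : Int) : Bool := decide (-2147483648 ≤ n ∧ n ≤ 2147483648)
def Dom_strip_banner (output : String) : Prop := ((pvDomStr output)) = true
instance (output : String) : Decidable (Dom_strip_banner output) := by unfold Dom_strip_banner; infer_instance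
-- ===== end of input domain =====

-- B swaps the phase order: trailing all-whitespace lines are trimmed by a backward pass over the
-- whole transcript first, then the first non-banner line is found and the tail joined rstripped
-- (no post-trim pop loop); an alternative decomposition, same cost.

-- ===== PORT A =====
-- one loop iteration of A: state is (skip, result)
def stepA (st : Bool × List String) (line : String) : Bool × List String :=
  if st.1 then
    if PySem.Str.isIn "MICROSOFT BASIC" line || PySem.Str.isIn "ALTAIR" line || PySem.Str.isIn "COPYRIGHT" line then st
    else if PySem.Str.isIn "BYTES FREE" line || PySem.Str.strip line == "OK" || PySem.Str.isIn "[8K VERSION]" line || PySem.Str.isIn "[4K VERSION]" line then st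
    else if PySem.Str.strip line == "" then st
    else (false, st.2 ++ [PySem.Str.rstrip line])
  else (false, st.2 ++ [PySem.Str.rstrip line])

-- 'while result and not result[-1]: result.pop()'
def popLoopA (r : List String) : List String :=
  match h : r.getLast? with
  | none => r
  | some s => if s == "" then popLoopA r.dropLast else r
termination_by r.length
decreasing_by
  have hne : r ≠ [] := by intro he; subst he; simp at h
  have := List.length_pos_iff.mpr hne
  simp [List.length_dropLast]; omega

def strip_banner (output : String) : String :=
  let lines := (PySem.Str.split? output "\n").getD []   -- sep "\n" ≠ "", so split? is always some
  let st := lines.foldl stepA (true, [])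
  PySem.Str.join "\n" (popLoopA st.2)

-- ===== PORT B =====
def isBannerB (line : String) : Bool :=
  let s := PySem.Str.strip line
  PySem.Str.isIn "MICROSOFT BASIC" line || PySem.Str.isIn "ALTAIR" line || PySem.Str.isIn "COPYRIGHT" line
    || PySem.Str.isIn "BYTES FREE" line || s == "OK"
    || PySem.Str.isIn "[8K VERSION]" line || PySem.Str.isIn "[4K VERSION]" line || s == ""

-- phase-1 loop body: 'if trimmed or line.strip() != "": trimmed.append(line)'
def stepB (acc : List String) (line : String) : List String :=
  if !acc.isEmpty || !(PySem.Str.strip line == "") then acc ++ [line] else acc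

def strip_banner_alt (output : String) : String :=
  let lines := (PySem.Str.split? output "\n").getD []   -- sep "\n" ≠ "", so split? is always some
  let trimmed := (lines.reverse.foldl stepB []).reverse
  let start := trimmed.findIdx (fun l => !isBannerB l)   -- next((k for k,l in enumerate(...) if not _is_banner(l)), len)
  PySem.Str.join "\n" ((trimmed.drop start).map PySem.Str.rstrip)

-- ===== PRECONDITION & SPEC =====
def Spec_strip_banner (output : String) (out : String) : Prop := out = strip_banner_alt output
instance (output : String) (out : String) : Decidable (Spec_strip_banner output out) := by unfold Spec_strip_banner; infer_instance

-- ===== CLAIM =====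
def Claim_equal_strip_banner : Prop := ∀ (output : String), Dom_strip_banner output → Spec_strip_banner output (strip_banner output)

-- ===== LEMMAS AND PROOFS =====

-- A's nested skip tests collapse to the single predicate isBannerB
set_option maxHeartbeats 2000000 in
theorem stepA_true (r : List String) (l : String) :
    stepA (true, r) l = if isBannerB l then (true, r) else (false, r ++ [PySem.Str.rstrip l]) := by
  cases h1 : PySem.Str.isIn "MICROSOFT BASIC" l <;>
  cases h2 : PySem.Str.isIn "ALTAIR" l <;>
  cases h3 : PySem.Str.isIn "COPYRIGHT" l <;>
  cases h4 : PySem.Str.isIn "BYTES FREE" l <;>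
  cases h5 : (PySem.Str.strip l == "OK") <;>
  cases h6 : PySem.Str.isIn "[8K VERSION]" l <;>
  cases h7 : PySem.Str.isIn "[4K VERSION]" l <;>
  cases h8 : (PySem.Str.strip l == "") <;>
  simp only [stepA, isBannerB, h1, h2, h3, h4, h5, h6, h7, h8, Bool.or_false, Bool.or_true,
    Bool.false_eq_true, if_pos, if_neg, not_false_eq_true]

-- once skip is false, A appends every remaining line rstripped
theorem foldl_stepA_false (lines : List String) (acc : List String) :
    lines.foldl stepA (false, acc) = (false, acc ++ lines.map PySem.Str.rstrip) := by
  induction lines generalizing acc with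
  | nil => simp
  | cons l ls ih => simp [stepA, ih]

-- A's skip phase computes dropWhile isBannerB, then the map of rstrip
theorem foldl_stepA_eq (lines : List String) :
    (lines.foldl stepA (true, [])).2 = (lines.dropWhile isBannerB).map PySem.Str.rstrip := by
  induction lines with
  | nil => simp
  | cons l ls ih =>
    rw [List.foldl_cons, stepA_true, List.dropWhile_cons]
    by_cases hb : isBannerB l = true
    · simpa [hb] using ih
    · simp only [hb, if_neg, Bool.false_eq_true, not_false_eq_true]
      rw [foldl_stepA_false]
      simp

-- one step of the pop-while loop
theorem popLoopA_concat (xs : List String) (x : String) :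
    popLoopA (xs ++ [x]) = if x == "" then popLoopA xs else xs ++ [x] := by
  rw [popLoopA]
  split
  · next h => simp at h
  · next s h =>
      rw [List.getLast?_concat] at h
      cases h
      simp

-- the pop-while loop is rdropWhile (· == "")
theorem popLoopA_eq (r : List String) : popLoopA r = r.rdropWhile (· == "") := by
  induction r using List.reverseRecOn with
  | nil => simp [popLoopA]
  | append_singleton xs x ih =>
    rw [popLoopA_concat, List.rdropWhile_concat]
    by_cases hx : (x == "") = true
    · simp [hx, ih]
    · simp [hx]

-- B's phase-1 loop, once the accumulator is nonempty, appends everything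
theorem foldl_stepB_ne (ys : List String) (acc : List String) (h : acc ≠ []) :
    ys.foldl stepB acc = acc ++ ys := by
  induction ys generalizing acc with
  | nil => simp
  | cons y ys ih =>
    have : stepB acc y = acc ++ [y] := by simp [stepB, h]
    rw [List.foldl_cons, this, ih _ (by simp)]
    simp

-- B's phase-1 loop is dropWhile (strip · == "")
theorem foldl_stepB_nil (ys : List String) :
    ys.foldl stepB [] = ys.dropWhile (fun l => PySem.Str.strip l == "") := by
  induction ys with
  | nil => simp
  | cons y ys ih =>
    by_cases hy : (PySem.Str.strip y == "") = true
    · simpa [stepB, hy, List.dropWhile_cons] using ih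
    · rw [List.foldl_cons]
      have : stepB [] y = [y] := by simp [stepB, hy]
      rw [this, foldl_stepB_ne _ _ (by simp), List.dropWhile_cons]
      simp [hy]

-- drop at findIdx(¬p) is dropWhile p
theorem drop_findIdx_not {α : Type} (p : α → Bool) (xs : List α) :
    xs.drop (xs.findIdx (fun x => !p x)) = xs.dropWhile p := by
  induction xs with
  | nil => simp
  | cons x xs ih =>
    by_cases hx : p x = true
    · rw [List.findIdx_cons]
      simp [hx, ih]
    · rw [List.findIdx_cons]
      simp [hx]

-- a string is all-whitespace iff its rstrip is empty iff its strip is empty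
theorem rstrip_eq_nil_iff (cs : List Char) :
    PySem.Chars.rstrip cs = [] ↔ ∀ c ∈ cs, PySem.Chars.isspace c = true := by
  simp [PySem.Chars.rstrip, List.dropWhile_eq_nil_iff]

theorem strip_empty_iff_rstrip (l : String) :
    (PySem.Str.strip l == "") = (PySem.Str.rstrip l == "") := by
  have hof : ∀ cs : List Char, (String.ofList cs = "") ↔ cs = [] := by
    intro cs
    constructor
    · intro hh
      have := congrArg String.toList hh
      simpa using this
    · intro hh
      simp [hh]
  have h : (PySem.Chars.rstrip (PySem.Chars.lstrip l.toList) = []) ↔ (PySem.Chars.rstrip l.toList = []) := by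
    rw [rstrip_eq_nil_iff, rstrip_eq_nil_iff]
    constructor
    · intro h c hc
      rw [← List.takeWhile_append_dropWhile (p := PySem.Chars.isspace) (l := l.toList)] at hc
      rcases List.mem_append.mp hc with h1 | h2
      · exact List.mem_takeWhile_imp h1
      · exact h c (by simpa [PySem.Chars.lstrip] using h2)
    · intro h c hc
      have hc' : c ∈ List.dropWhile PySem.Chars.isspace l.toList := by
        simpa [PySem.Chars.lstrip] using hc
      exact h c (List.Sublist.mem hc' (List.dropWhile_sublist _))
  simp only [PySem.Str.strip, PySem.Str.rstrip, PySem.Chars.strip]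
  by_cases he : PySem.Chars.rstrip (PySem.Chars.lstrip l.toList) = []
  · simp [he, h.mp he]
  · have h2 := (not_iff_not.mpr h).mp he
    have e1 : (String.ofList (PySem.Chars.rstrip (PySem.Chars.lstrip l.toList)) == "") = false := by
      simp [hof, he]
    have e2 : (String.ofList (PySem.Chars.rstrip l.toList) == "") = false := by
      simp [hof, h2]
    rw [e1, e2]

-- every all-whitespace line is a banner line
theorem strip_empty_banner (l : String) (h : (PySem.Str.strip l == "") = true) :
    isBannerB l = true := by
  simp [isBannerB, h]

-- rdropWhile commutes with map
theorem rdropWhile_map {α β : Type} (q : β → Bool) (f : α → β) (xs : List α) :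
    (xs.map f).rdropWhile q = (xs.rdropWhile (fun x => q (f x))).map f := by
  simp [List.rdropWhile, ← List.map_reverse, List.dropWhile_map, Function.comp_def]

-- dropping a banner prefix and trimming an all-whitespace tail commute (every trimmed line is banner)
theorem rdW_dW_comm {α : Type} (p q : α → Bool) (h : ∀ x, q x = true → p x = true) (xs : List α) :
    (xs.dropWhile p).rdropWhile q = (xs.rdropWhile q).dropWhile p := by
  induction xs using List.reverseRecOn with
  | nil => simp
  | append_singleton xs x ih =>
    rw [List.rdropWhile_concat, List.dropWhile_append]
    by_cases hq : q x = true
    · have hp := h x hq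
      simp only [hq, if_pos]
      by_cases he : (xs.dropWhile p).isEmpty = true
      · have : xs.dropWhile p = [] := by simpa [List.isEmpty_iff] using he
        simp [this, hp, ← ih]
      · simp only [he, if_neg, Bool.false_eq_true, not_false_eq_true]
        rw [List.rdropWhile_concat]
        simp [hq, ih]
    · simp only [hq, if_neg, Bool.false_eq_true, not_false_eq_true]
      rw [List.dropWhile_append]
      by_cases he : (xs.dropWhile p).isEmpty = true
      · have hxs : xs.dropWhile p = [] := by simpa [List.isEmpty_iff] using he
        by_cases hp : p x = true
        · simp [hxs, hp]
        · simp [hxs, hp, hq]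
      · simp only [he, if_neg, Bool.false_eq_true, not_false_eq_true]
        rw [List.rdropWhile_concat]
        simp [hq]

-- ===== VERDICT =====
theorem strip_banner_spec : Claim_equal_strip_banner := by
  intro output _
  unfold Spec_strip_banner strip_banner strip_banner_alt
  simp only [foldl_stepA_eq, popLoopA_eq, foldl_stepB_nil]
  rw [drop_findIdx_not]
  rw [rdropWhile_map]
  have hpred : (fun x : String => (PySem.Str.rstrip x == "")) = (fun l : String => PySem.Str.strip l == "") :=
    funext fun l => (strip_empty_iff_rstrip l).symm
  rw [hpred, rdW_dW_comm isBannerB _ strip_empty_banner]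
  congr 1
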